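-- pv_equiv track=rewrite | github.com/FelixZhang028/waste_incineration | scripts/ml_feature_importance.py | _build_stat_names
-- ===== SOURCE A (Python) =====
-- WINDOW_STATS = ("mean", "std", "min", "max", "first", "last", "delta")
--
-- def _build_stat_names(feature_cols: list[str]) -> tuple[list[str], list[str], list[str]]:
--     stat_features: list[str] = []
--     base_features: list[str] = []
--     stats: list[str] = []
--     for base in feature_cols:
--         for stat in WINDOW_STATS:
--             stat_features.append(f"{base}__{stat}")
--             base_features.append(base)
--             stats.append(stat)
--     return stat_features, base_features, stats
-- ===== SOURCE B (Python) =====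
-- WINDOW_STATS = ("mean", "std", "min", "max", "first", "last", "delta")
--
-- def _build_stat_names(feature_cols: list[str]) -> tuple[list[str], list[str], list[str]]:
--     # Divide and conquer: build each half's three lists recursively and
--     # concatenate; a singleton yields its whole per-feature block directly.
--     n = len(feature_cols)
--     if n == 0:
--         return [], [], []
--     if n == 1:
--         b = feature_cols[0]
--         return ([b + "__" + s for s in WINDOW_STATS],
--                 [b] * len(WINDOW_STATS),
--                 list(WINDOW_STATS))
--     mid = n // 2
--     lsf, lbf, lst = _build_stat_names(feature_cols[:mid])
--     rsf, rbf, rst = _build_stat_names(feature_cols[mid:])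
--     return lsf + rsf, lbf + rbf, lst + rst
-- ===== Notes on version B (the rewrite author's own statement) =====
-- stated objective: alternative
-- what changed: Replaces A's fused iterative loop appending element-by-element to three accumulators with a divide-and-conquer recursion: split the column list in half, build the three lists for each half recursively, and concatenate them (singletons produce their whole per-feature block at once).
import Mathlib
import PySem

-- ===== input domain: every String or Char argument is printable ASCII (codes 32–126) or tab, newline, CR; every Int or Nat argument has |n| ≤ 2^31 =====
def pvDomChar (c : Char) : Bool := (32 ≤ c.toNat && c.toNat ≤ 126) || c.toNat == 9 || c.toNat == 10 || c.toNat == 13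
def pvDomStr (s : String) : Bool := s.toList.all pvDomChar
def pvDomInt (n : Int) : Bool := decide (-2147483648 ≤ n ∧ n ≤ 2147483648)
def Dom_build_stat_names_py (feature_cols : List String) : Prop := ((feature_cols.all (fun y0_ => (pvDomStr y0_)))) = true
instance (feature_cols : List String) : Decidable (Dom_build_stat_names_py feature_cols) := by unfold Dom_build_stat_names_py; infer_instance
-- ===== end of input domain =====

-- B replaces A's fused append-to-three-accumulators loop by a divide-and-conquer
-- recursion (split in half, concatenate the halves' results); objective: alternative.

-- the module constant WINDOW_STATS
def pvWindowStats : List String := ["mean", "std", "min", "max", "first", "last", "delta"]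

-- ===== PORT A =====
def build_stat_names_py (feature_cols : List String) : List String × List String × List String :=
  feature_cols.foldl
    (fun acc base =>
      pvWindowStats.foldl
        (fun acc stat =>
          (acc.1 ++ [base ++ "__" ++ stat], acc.2.1 ++ [base], acc.2.2 ++ [stat]))
        acc)
    ([], [], [])

-- ===== PORT B =====
-- feature_cols[:mid] / [mid:] with 0 ≤ mid ≤ n are exactly List.take / List.drop
def build_stat_names_py_alt : List String → List String × List String × List String
  | [] => ([], [], [])
  | [b] => (pvWindowStats.map (fun s => b ++ "__" ++ s),
            List.replicate pvWindowStats.length b,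
            pvWindowStats)
  | x :: y :: rest =>
    let cols := x :: y :: rest
    let mid := cols.length / 2
    let l := build_stat_names_py_alt (cols.take mid)
    let r := build_stat_names_py_alt (cols.drop mid)
    (l.1 ++ r.1, l.2.1 ++ r.2.1, l.2.2 ++ r.2.2)
termination_by cols => cols.length
decreasing_by
  · simp [List.length_take]; omega
  · simp [List.length_drop]; omega

-- ===== PRECONDITION & SPEC =====
def Spec_build_stat_names_py (feature_cols : List String) (out : List String × List String × List String) : Prop := out = build_stat_names_py_alt feature_cols
instance (feature_cols : List String) (out : List String × List String × List String) : Decidable (Spec_build_stat_names_py feature_cols out) := by unfold Spec_build_stat_names_py; infer_instance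

-- ===== CLAIM (what is proved, stated in full; the proofs are below) =====
def Claim_equal_build_stat_names_py : Prop := ∀ (feature_cols : List String), Dom_build_stat_names_py feature_cols → Spec_build_stat_names_py feature_cols (build_stat_names_py feature_cols)

-- ===== LEMMAS AND PROOFS =====

-- B's divide and conquer equals a blockwise flatMap characterisation
lemma alt_eq_flatMap (l : List String) :
    build_stat_names_py_alt l
    = (l.flatMap (fun b => pvWindowStats.map (fun s => b ++ "__" ++ s)),
       l.flatMap (fun b => List.replicate pvWindowStats.length b),
       l.flatMap (fun _ => pvWindowStats)) := by
  induction l using build_stat_names_py_alt.induct with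
  | case1 => simp [build_stat_names_py_alt]
  | case2 b => simp [build_stat_names_py_alt]
  | case3 x y rest =>
    rename_i ihl ihr
    rw [build_stat_names_py_alt]
    rw [ihl, ihr]
    have h := List.take_append_drop ((x :: y :: rest).length / 2) (x :: y :: rest)
    conv_rhs => rw [← h]
    simp only [List.flatMap_append]
    rfl

-- A's fold with general accumulator appends the flatMap blocks
lemma build_stat_names_fold_eq (l : List String) (a b c : List String) :
    l.foldl
      (fun acc base =>
        pvWindowStats.foldl
          (fun acc stat =>
            (acc.1 ++ [base ++ "__" ++ stat], acc.2.1 ++ [base], acc.2.2 ++ [stat]))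
          acc)
      (a, b, c)
    = (a ++ l.flatMap (fun b => pvWindowStats.map (fun s => b ++ "__" ++ s)),
       b ++ l.flatMap (fun b => List.replicate pvWindowStats.length b),
       c ++ l.flatMap (fun _ => pvWindowStats)) := by
  induction l generalizing a b c with
  | nil => simp
  | cons x xs ih =>
    simp only [List.foldl_cons]
    rw [show (pvWindowStats.foldl
          (fun acc stat =>
            (acc.1 ++ [x ++ "__" ++ stat], acc.2.1 ++ [x], acc.2.2 ++ [stat]))
          ((a, b, c) : List String × List String × List String))
        = (a ++ pvWindowStats.map (fun s => x ++ "__" ++ s),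
           b ++ List.replicate pvWindowStats.length x,
           c ++ pvWindowStats) from by
          simp [pvWindowStats, List.foldl, List.replicate]]
    rw [ih]
    simp [List.append_assoc]

theorem pv_main : ∀ (l : List String),
    build_stat_names_py l = build_stat_names_py_alt l := by
  intro l
  unfold build_stat_names_py
  rw [build_stat_names_fold_eq, alt_eq_flatMap]
  simp

-- ===== VERDICT (by name: the statement is the Claim_ definition above) =====
theorem build_stat_names_py_spec : Claim_equal_build_stat_names_py := by
  intro l _
  unfold Spec_build_stat_names_py
  exact pv_main l
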